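-- pv_equiv track=rewrite | github.com/zuleyhairmakk/python-codestepbystep | csbs/second_half_letters.py | second_half_letters
-- ===== SOURCE A (Python) =====
-- def second_half_letters(x):
--     alph=["n","o","p","q","r","s","t","u","v","w","x","y","z"]
--     x=x.lower()
--     syc=0
--     shl=0
--     for i in range(len(x)):
--         if(x[i] not in alph):
--             syc +=1
--         else:
--             shl +=1
--     return shl
-- ===== SOURCE B (Python) =====
-- def second_half_letters(x):
--     counts = {}
--     for ch in x.lower():
--         counts[ch] = counts.get(ch, 0) + 1
--     return sum(counts.get(c, 0) for c in "nopqrstuvwxyz")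
-- ===== Notes on version B (the rewrite author's own statement) =====
-- stated objective: alternative
-- what changed: B builds a frequency table of the lowercased input in one pass and then sums the counts of the thirteen second-half letters, instead of branching per character on membership in a 13-element list.
import Mathlib
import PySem

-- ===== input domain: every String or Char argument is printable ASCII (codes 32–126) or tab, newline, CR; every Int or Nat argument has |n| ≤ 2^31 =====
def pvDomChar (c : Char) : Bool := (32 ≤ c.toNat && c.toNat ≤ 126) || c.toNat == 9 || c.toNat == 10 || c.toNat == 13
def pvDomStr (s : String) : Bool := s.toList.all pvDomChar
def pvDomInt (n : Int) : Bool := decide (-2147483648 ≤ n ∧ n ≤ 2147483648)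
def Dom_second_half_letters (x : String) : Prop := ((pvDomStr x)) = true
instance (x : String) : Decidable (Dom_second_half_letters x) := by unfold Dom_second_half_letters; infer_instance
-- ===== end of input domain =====

-- B replaces A's per-character membership branch by a one-pass frequency table summed over the thirteen target letters (alternative decomposition).


-- ===== PORT A =====
-- string indexing x[i] yields a one-char string in Python; ported as the Char at that index (exact)
def second_half_letters (x : String) : Int :=
  let alph : List Char := ['n','o','p','q','r','s','t','u','v','w','x','y','z']
  let xl := PySem.Str.lower x
  let st := (PySem.List.pyRange 0 (PySem.Str.len xl) 1).foldl
    (fun (st : Int × Int) i =>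
      if alph.contains (PySem.List.pyGetD xl.toList i ' ') = false then (st.1 + 1, st.2)
      else (st.1, st.2 + 1)) (0, 0)
  st.2

-- ===== PORT B =====
def second_half_letters_alt (x : String) : Int :=
  let counts := (PySem.Str.lower x).toList.foldl
    (fun (d : PySem.Dict Char Int) ch => d.insert ch (d.getD ch 0 + 1)) PySem.Dict.empty
  (("nopqrstuvwxyz".toList).map (fun c => counts.getD c 0)).sum

-- ===== PRECONDITION & SPEC =====
def Spec_second_half_letters (x : String) (out : Int) : Prop := out = second_half_letters_alt x
instance (x : String) (out : Int) : Decidable (Spec_second_half_letters x out) := by unfold Spec_second_half_letters; infer_instance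

-- ===== CLAIM (what is proved, stated in full; the proofs are below) =====
def Claim_equal_second_half_letters : Prop := ∀ (x : String), Dom_second_half_letters x → Spec_second_half_letters x (second_half_letters x)

-- ===== LEMMAS AND PROOFS =====

-- A's pair fold: the second component counts the characters in the target list
theorem shl_pairFold (alph : List Char) :
    ∀ (l : List Char) (a b : Int),
      (l.foldl (fun (st : Int × Int) c =>
        if alph.contains c = false then (st.1 + 1, st.2) else (st.1, st.2 + 1)) (a, b)).2
      = b + (l.countP (fun c => alph.contains c) : Int) := by
  intro l
  induction l with
  | nil => simp
  | cons c cs ih =>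
    intro a b
    rw [List.foldl_cons, List.countP_cons]
    cases h : alph.contains c
    · simp only [h]
      rw [if_pos trivial, ih]
      simp
    · simp only [h]
      rw [if_neg (by simp), show ((a, b).1, (a, b).2 + 1) = (a, b + 1) from rfl, ih]
      push_cast
      ring

-- with nodup targets, the 0/1 indicator sum over targets is the membership indicator
theorem shl_indicator (c : Char) :
    ∀ (ts : List Char), ts.Nodup →
      (ts.map (fun t => if c == t then (1 : Int) else 0)).sum
      = if c ∈ ts then 1 else 0 := by
  intro ts
  induction ts with
  | nil => simp
  | cons t ts ih =>
    intro hnd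
    rw [List.map_cons, List.sum_cons, ih hnd.of_cons]
    by_cases h : t = c
    · subst h
      have hc : t ∉ ts := (List.nodup_cons.mp hnd).1
      simp [hc]
    · simp [beq_iff_eq, Ne.symm h, List.mem_cons]

-- summing per-letter counts over nodup targets equals counting membership
theorem shl_sumCount (ts : List Char) (hnd : ts.Nodup) :
    ∀ (cs : List Char),
      (ts.map (fun t => (cs.count t : Int))).sum
      = (cs.countP (fun c => ts.contains c) : Int) := by
  intro cs
  induction cs with
  | nil => simp
  | cons c cs ih =>
    have h1 : (ts.map (fun t => ((c :: cs).count t : Int))).sum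
        = (ts.map (fun t => (cs.count t : Int) + if c == t then (1 : Int) else 0)).sum := by
      congr 1
      apply List.map_congr_left
      intro t _
      simp only [List.count_cons, Nat.cast_add, Nat.cast_ite, Nat.cast_one, Nat.cast_zero]
    rw [h1, PySem.List.sum_map_add_int, ih, shl_indicator c ts hnd, List.countP_cons]
    by_cases h : c ∈ ts
    · simp [List.contains_eq_mem, h]
    · simp [List.contains_eq_mem, h]

-- ===== VERDICT (by name: the statement is the Claim_ definition above) =====
theorem second_half_letters_spec : Claim_equal_second_half_letters := by
  intro x _
  show second_half_letters x = second_half_letters_alt x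
  unfold second_half_letters second_half_letters_alt
  simp only [PySem.Str.len_eq, PySem.Dict.foldl_insert_getD_add_one_eq_counter,
    PySem.Dict.getD_counter]
  rw [PySem.List.foldl_pyRange_zero_pyGetD' (PySem.Str.lower x).toList ' '
      (fun (st : Int × Int) c =>
        if (['n','o','p','q','r','s','t','u','v','w','x','y','z'].contains c) = false
        then (st.1 + 1, st.2) else (st.1, st.2 + 1)) (0, 0)]
  rw [shl_pairFold]
  have hts : "nopqrstuvwxyz".toList
      = ['n','o','p','q','r','s','t','u','v','w','x','y','z'] := by decide
  rw [hts, shl_sumCount _ (by decide)]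
  simp
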